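-- pv_equiv track=rewrite | github.com/A-Nama/solarpunk | game_logic.py | simulate_solarpunk_ecosystem
-- ===== SOURCE A (Python) =====
-- def simulate_solarpunk_ecosystem(ecosystem, globe_data):
--     """
--     Simulate the ecosystem changes based on real-time GLOBE data.
--
--     Parameters:
--         ecosystem (dict): Current state of the ecosystem.
--         globe_data (dict): Real-time environmental data fetched from GLOBE API.
--
--     Returns:
--         dict: Updated ecosystem parameters.
--     """
--     # Example: Adjust vegetation and water based on air temperature
--     if globe_data and 'air_temperature' in globe_data and globe_data['air_temperature']:
--         # Use the latest air temperature data
--         air_temp = globe_data['air_temperature'][-1]  # Assuming latest is last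
--         if air_temp > 35:
--             ecosystem['vegetation'] -= 10  # High temperature reduces vegetation
--             ecosystem['water'] -= 5       # Increased evaporation
--             ecosystem['energy'] += 5      # More energy needed for cooling
--         elif air_temp < 15:
--             ecosystem['vegetation'] -= 5   # Cold affects plant growth
--             ecosystem['water'] += 5        # Less evaporation
--             ecosystem['energy'] -= 5       # Less energy needed for cooling
--         else:
--             ecosystem['vegetation'] += 5   # Favorable temperatures boost vegetation
--             ecosystem['water'] += 2        # Normal evaporation
--             ecosystem['energy'] += 2       # Normal energy usage
--
--     # Adjust based on precipitation data
--     if globe_data and 'precipitation' in globe_data and globe_data['precipitation']: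
--         precipitation = globe_data['precipitation'][-1]  # Latest precipitation
--         if precipitation > 100:
--             ecosystem['water'] += 20    # Abundant water
--             ecosystem['sustainability'] += 5  # Improved water management
--         elif precipitation < 20:
--             ecosystem['water'] -= 10    # Water scarcity
--             ecosystem['sustainability'] -= 5  # Strain on resources
--         else:
--             ecosystem['water'] += 5     # Moderate precipitation
--
--     # Adjust based on cloud coverage
--     if globe_data and 'cloud_coverage' in globe_data and globe_data['cloud_coverage']:
--         cloud_cover = globe_data['cloud_coverage'][-1]  # Latest cloud cover
--         if cloud_cover > 80:
--             ecosystem['energy'] -= 10  # Less solar energy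
--             ecosystem['sustainability'] -= 5
--         elif cloud_cover < 20:
--             ecosystem['energy'] += 10  # More solar energy
--             ecosystem['sustainability'] += 5
--         else:
--             ecosystem['energy'] += 2    # Slight variation in energy
--
--     # Ensure parameters stay within 0-100 range
--     for key in ecosystem:
--         ecosystem[key] = max(0, min(100, ecosystem[key]))
--
--     return ecosystem
-- ===== SOURCE B (Python) =====
-- # Transposed computation: instead of iterating fields and mutating the dict per
-- # tier, read the three latest readings once, then compute each ecosystem key's
-- # total delta directly (key-centric) and build the result in a single pass.
-- # (A mutates its argument in place; equivalence is about the return value only.)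
-- def simulate_solarpunk_ecosystem(ecosystem, globe_data):
--     def latest(field):
--         if globe_data and field in globe_data and globe_data[field]:
--             return globe_data[field][-1]
--         return None
--
--     t = latest('air_temperature')
--     p = latest('precipitation')
--     c = latest('cloud_coverage')
--
--     def delta(key):
--         d = 0
--         if t is not None:
--             if key == 'vegetation':
--                 d += -10 if t > 35 else (-5 if t < 15 else 5)
--             elif key == 'water':
--                 d += -5 if t > 35 else (5 if t < 15 else 2)
--             elif key == 'energy':
--                 d += 5 if t > 35 else (-5 if t < 15 else 2)
--         if p is not None:
--             if key == 'water':
--                 d += 20 if p > 100 else (-10 if p < 20 else 5)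
--             elif key == 'sustainability':
--                 d += 5 if p > 100 else (-5 if p < 20 else 0)
--         if c is not None:
--             if key == 'energy':
--                 d += -10 if c > 80 else (10 if c < 20 else 2)
--             elif key == 'sustainability':
--                 d += -5 if c > 80 else (5 if c < 20 else 0)
--         return d
--
--     return {k: max(0, min(100, v + delta(k))) for k, v in ecosystem.items()}
-- ===== Notes on version B (the rewrite author's own statement) =====
-- stated objective: alternative
-- what changed: Transposes the computation: instead of A's field-major pass that mutates the dict tier by tier, B reads the three latest readings once and computes each ecosystem key's total delta directly (key-major), building the result in a single pass over the ecosystem (A mutates its argument in place; equivalence is about the return value).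
import Mathlib
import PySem

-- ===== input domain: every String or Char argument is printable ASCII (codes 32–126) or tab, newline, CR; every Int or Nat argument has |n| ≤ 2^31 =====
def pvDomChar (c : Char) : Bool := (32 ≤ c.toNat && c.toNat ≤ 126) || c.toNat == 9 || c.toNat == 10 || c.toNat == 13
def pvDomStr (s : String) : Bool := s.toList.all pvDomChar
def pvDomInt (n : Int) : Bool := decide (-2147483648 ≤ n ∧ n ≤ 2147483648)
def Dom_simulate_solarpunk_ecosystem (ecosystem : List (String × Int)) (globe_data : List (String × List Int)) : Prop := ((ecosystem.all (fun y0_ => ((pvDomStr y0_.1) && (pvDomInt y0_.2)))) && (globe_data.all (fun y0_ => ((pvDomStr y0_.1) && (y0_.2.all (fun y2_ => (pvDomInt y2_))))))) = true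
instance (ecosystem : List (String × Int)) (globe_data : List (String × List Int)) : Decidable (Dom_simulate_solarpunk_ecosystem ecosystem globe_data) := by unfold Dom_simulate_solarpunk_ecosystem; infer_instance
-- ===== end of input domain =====

-- B transposes A's field-major tier mutation into a key-major single pass (each key's total
-- delta is computed directly from the three latest readings); A mutates `ecosystem` in place,
-- so the equivalence proved here is about the return value only.

-- ===== PORT A =====
-- One helper per Python `if` block (the Python code of the block, step for step).
def pvAirBlock (g : PySem.Dict String (List Int)) (eco : PySem.Dict String Int) : PySem.Dict String Int :=
  if g.items ≠ [] ∧ g.contains "air_temperature" = true ∧ g.getD "air_temperature" [] ≠ [] then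
    let air_temp := PySem.List.pyGetD (g.getD "air_temperature" []) (-1) 0
    if air_temp > 35 then
      let e := eco.insert "vegetation" (eco.getD "vegetation" 0 - 10)
      let e := e.insert "water" (e.getD "water" 0 - 5)
      e.insert "energy" (e.getD "energy" 0 + 5)
    else if air_temp < 15 then
      let e := eco.insert "vegetation" (eco.getD "vegetation" 0 - 5)
      let e := e.insert "water" (e.getD "water" 0 + 5)
      e.insert "energy" (e.getD "energy" 0 - 5)
    else
      let e := eco.insert "vegetation" (eco.getD "vegetation" 0 + 5)
      let e := e.insert "water" (e.getD "water" 0 + 2)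
      e.insert "energy" (e.getD "energy" 0 + 2)
  else eco

def pvPrecipBlock (g : PySem.Dict String (List Int)) (eco : PySem.Dict String Int) : PySem.Dict String Int :=
  if g.items ≠ [] ∧ g.contains "precipitation" = true ∧ g.getD "precipitation" [] ≠ [] then
    let precipitation := PySem.List.pyGetD (g.getD "precipitation" []) (-1) 0
    if precipitation > 100 then
      let e := eco.insert "water" (eco.getD "water" 0 + 20)
      e.insert "sustainability" (e.getD "sustainability" 0 + 5)
    else if precipitation < 20 then
      let e := eco.insert "water" (eco.getD "water" 0 - 10)
      e.insert "sustainability" (e.getD "sustainability" 0 - 5)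
    else
      eco.insert "water" (eco.getD "water" 0 + 5)
  else eco

def pvCloudBlock (g : PySem.Dict String (List Int)) (eco : PySem.Dict String Int) : PySem.Dict String Int :=
  if g.items ≠ [] ∧ g.contains "cloud_coverage" = true ∧ g.getD "cloud_coverage" [] ≠ [] then
    let cloud_cover := PySem.List.pyGetD (g.getD "cloud_coverage" []) (-1) 0
    if cloud_cover > 80 then
      let e := eco.insert "energy" (eco.getD "energy" 0 - 10)
      e.insert "sustainability" (e.getD "sustainability" 0 - 5)
    else if cloud_cover < 20 then
      let e := eco.insert "energy" (eco.getD "energy" 0 + 10)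
      e.insert "sustainability" (e.getD "sustainability" 0 + 5)
    else
      eco.insert "energy" (eco.getD "energy" 0 + 2)
  else eco

def simulate_solarpunk_ecosystem (ecosystem : List (String × Int)) (globe_data : List (String × List Int)) : List (String × Int) :=
  let g : PySem.Dict String (List Int) := PySem.Dict.mk globe_data
  let eco : PySem.Dict String Int := PySem.Dict.mk ecosystem
  let eco := pvAirBlock g eco
  let eco := pvPrecipBlock g eco
  let eco := pvCloudBlock g eco
  -- for key in ecosystem: ecosystem[key] = max(0, min(100, ecosystem[key]))
  (eco.keys.foldl (fun d k => d.insert k (max 0 (min 100 (d.getD k 0)))) eco).items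

-- ===== PORT B =====
-- Source B's `latest(field)`: the latest reading of a field, None when the guard fails
def pvLatestB (g : PySem.Dict String (List Int)) (f : String) : Option Int :=
  if g.items ≠ [] ∧ g.contains f = true ∧ g.getD f [] ≠ [] then
    some (PySem.List.pyGetD (g.getD f []) (-1) 0)
  else none

-- Source B's `delta(key)`: total delta of one ecosystem key from the three readings
def pvDelta (t p c : Option Int) (k : String) : Int :=
  (match t with
   | some v =>
     if k == "vegetation" then (if v > 35 then -10 else if v < 15 then -5 else 5)
     else if k == "water" then (if v > 35 then -5 else if v < 15 then 5 else 2)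
     else if k == "energy" then (if v > 35 then 5 else if v < 15 then -5 else 2)
     else 0
   | none => 0)
  +
  (match p with
   | some v =>
     if k == "water" then (if v > 100 then 20 else if v < 20 then -10 else 5)
     else if k == "sustainability" then (if v > 100 then 5 else if v < 20 then -5 else 0)
     else 0
   | none => 0)
  +
  (match c with
   | some v =>
     if k == "energy" then (if v > 80 then -10 else if v < 20 then 10 else 2)
     else if k == "sustainability" then (if v > 80 then -5 else if v < 20 then 5 else 0)
     else 0
   | none => 0)

def simulate_solarpunk_ecosystem_alt (ecosystem : List (String × Int)) (globe_data : List (String × List Int)) : List (String × Int) :=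
  let g : PySem.Dict String (List Int) := PySem.Dict.mk globe_data
  let t := pvLatestB g "air_temperature"
  let p := pvLatestB g "precipitation"
  let c := pvLatestB g "cloud_coverage"
  -- {k: max(0, min(100, v + delta(k))) for k, v in ecosystem.items()}
  (ecosystem.foldl (fun (d : PySem.Dict String Int) kv =>
      d.insert kv.1 (max 0 (min 100 (kv.2 + pvDelta t p c kv.1)))) PySem.Dict.empty).items

-- ===== PRECONDITION & SPEC =====
-- helpers for Pre_: the branch-firing guard and the latest reading of a field
def pvActive (globe_data : List (String × List Int)) (f : String) : Prop :=
  (PySem.Dict.mk globe_data).contains f = true ∧ (PySem.Dict.mk globe_data).getD f [] ≠ []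
def pvLatest (globe_data : List (String × List Int)) (f : String) : Int :=
  PySem.List.pyGetD ((PySem.Dict.mk globe_data).getD f []) (-1) 0
-- the ecosystem keys each fired branch writes (Python raises KeyError on a missing one)
def pvKeysOK (ecosystem : List (String × Int)) (globe_data : List (String × List Int)) : Prop :=
  (pvActive globe_data "air_temperature" →
     "vegetation" ∈ ecosystem.map Prod.fst ∧ "water" ∈ ecosystem.map Prod.fst ∧ "energy" ∈ ecosystem.map Prod.fst) ∧
  (pvActive globe_data "precipitation" →
     "water" ∈ ecosystem.map Prod.fst ∧
     ((pvLatest globe_data "precipitation" > 100 ∨ pvLatest globe_data "precipitation" < 20) →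
        "sustainability" ∈ ecosystem.map Prod.fst)) ∧
  (pvActive globe_data "cloud_coverage" →
     "energy" ∈ ecosystem.map Prod.fst ∧
     ((pvLatest globe_data "cloud_coverage" > 80 ∨ pvLatest globe_data "cloud_coverage" < 20) →
        "sustainability" ∈ ecosystem.map Prod.fst))

-- Pre_ excludes (a) duplicate keys, which cannot occur in the Python dicts these association
-- lists stand for, and (b) inputs where a fired branch writes an ecosystem key that is absent,
-- on which A raises KeyError.
def Pre_simulate_solarpunk_ecosystem (ecosystem : List (String × Int)) (globe_data : List (String × List Int)) : Prop :=
  (ecosystem.map Prod.fst).Nodup ∧ (globe_data.map Prod.fst).Nodup ∧ pvKeysOK ecosystem globe_data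
instance (ecosystem : List (String × Int)) (globe_data : List (String × List Int)) : Decidable (Pre_simulate_solarpunk_ecosystem ecosystem globe_data) := by
  unfold Pre_simulate_solarpunk_ecosystem pvKeysOK pvActive; infer_instance

def pvWitness_simulate_solarpunk_ecosystem : (List (String × Int)) × (List (String × List Int)) :=
  ([("vegetation", 50), ("water", 40), ("energy", 60), ("sustainability", 70)],
   [("air_temperature", [20]), ("precipitation", [50])])

def Spec_simulate_solarpunk_ecosystem (ecosystem : List (String × Int)) (globe_data : List (String × List Int)) (out : List (String × Int)) : Prop := out = simulate_solarpunk_ecosystem_alt ecosystem globe_data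
instance (ecosystem : List (String × Int)) (globe_data : List (String × List Int)) (out : List (String × Int)) : Decidable (Spec_simulate_solarpunk_ecosystem ecosystem globe_data out) := by unfold Spec_simulate_solarpunk_ecosystem; infer_instance

-- ===== CLAIM (what is proved, stated in full; the proofs are below) =====
def Claim_equal_simulate_solarpunk_ecosystem : Prop := ∀ (ecosystem : List (String × Int)) (globe_data : List (String × List Int)), Dom_simulate_solarpunk_ecosystem ecosystem globe_data → Pre_simulate_solarpunk_ecosystem ecosystem globe_data → Spec_simulate_solarpunk_ecosystem ecosystem globe_data (simulate_solarpunk_ecosystem ecosystem globe_data)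

-- ===== LEMMAS AND PROOFS =====

-- apply a list of (key, delta) updates, Python-style `d[k] = d.get(k, 0) + δ`
def pvApply (d : PySem.Dict String Int) (us : List (String × Int)) : PySem.Dict String Int :=
  us.foldl (fun d u => d.insert u.1 (d.getD u.1 0 + u.2)) d

def pvSum (us : List (String × Int)) (k : String) : Int :=
  ((us.filter (fun u => u.1 == k)).map Prod.snd).sum

-- the (key, delta) list an A-block contributes, as a tier table
def pvChoose (g : PySem.Dict String (List Int)) (fr : String × List ((Int → Bool) × List (String × Int))) : List (String × Int) :=
  if g.items ≠ [] ∧ g.contains fr.1 = true ∧ g.getD fr.1 [] ≠ [] then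
    match fr.2.find? (fun t => t.1 (PySem.List.pyGetD (g.getD fr.1 []) (-1) 0)) with
    | some t => t.2
    | none => []
  else []

def pvUs (g : PySem.Dict String (List Int)) : List (String × Int) :=
  pvChoose g ("air_temperature",
      [((fun v => v > 35), [("vegetation", -10), ("water", -5), ("energy", 5)]),
       ((fun v => v < 15), [("vegetation", -5), ("water", 5), ("energy", -5)]),
       ((fun _ => true),   [("vegetation", 5), ("water", 2), ("energy", 2)])])
    ++ pvChoose g ("precipitation",
      [((fun v => v > 100), [("water", 20), ("sustainability", 5)]),
       ((fun v => v < 20),  [("water", -10), ("sustainability", -5)]),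
       ((fun _ => true),    [("water", 5)])])
    ++ pvChoose g ("cloud_coverage",
      [((fun v => v > 80), [("energy", -10), ("sustainability", -5)]),
       ((fun v => v < 20), [("energy", 10), ("sustainability", 5)]),
       ((fun _ => true),   [("energy", 2)])])

theorem pvApply_append (d : PySem.Dict String Int) (a b : List (String × Int)) :
    pvApply d (a ++ b) = pvApply (pvApply d a) b := by
  simp [pvApply, List.foldl_append]

theorem pvSum_append (a b : List (String × Int)) (k : String) :
    pvSum (a ++ b) k = pvSum a k + pvSum b k := by
  simp [pvSum, List.filter_append]

theorem pvSum_cons (u : String × Int) (us : List (String × Int)) (k : String) :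
    pvSum (u :: us) k = (if u.1 = k then u.2 else 0) + pvSum us k := by
  simp [pvSum, List.filter_cons]
  split_ifs with h <;> simp_all

theorem items_pvApply (us : List (String × Int)) :
    ∀ (l : List (String × Int)), (l.map Prod.fst).Nodup → (∀ u ∈ us, u.1 ∈ l.map Prod.fst) →
    (pvApply (PySem.Dict.mk l) us).items = l.map (fun kv => (kv.1, kv.2 + pvSum us kv.1)) := by
  induction us with
  | nil => intro l _ _; simp [pvApply, pvSum]
  | cons u us ih =>
    intro l hnd hmem
    have hu : u.1 ∈ l.map Prod.fst := hmem u List.mem_cons_self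
    obtain ⟨p, hp, hfst⟩ := List.mem_map.mp hu
    have hcont : (PySem.Dict.mk l).contains u.1 = true := by
      rw [PySem.Dict.contains_iff_mem_keys]; exact hu
    have hget : (PySem.Dict.mk l).getD u.1 0 = p.2 := by
      refine PySem.Dict.getD_of_mem_items _ ?_ hnd 0
      have : p = (u.1, p.2) := by rw [← hfst]
      rw [← this]; exact hp
    have hstep : pvApply (PySem.Dict.mk l) (u :: us)
        = pvApply (PySem.Dict.mk (l.map (fun q => if q.1 == u.1 then (u.1, p.2 + u.2) else q))) us := by
      show pvApply ((PySem.Dict.mk l).insert u.1 ((PySem.Dict.mk l).getD u.1 0 + u.2)) us = _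
      congr 1
      apply PySem.Dict.ext
      rw [PySem.Dict.items_insert_of_contains _ _ hcont, hget]
    have hfst' : (l.map (fun q => if q.1 == u.1 then (u.1, p.2 + u.2) else q)).map Prod.fst
        = l.map Prod.fst := by
      rw [List.map_map]
      refine List.map_congr_left (fun q _ => ?_)
      by_cases hq : q.1 = u.1 <;> simp [hq]
    rw [hstep, ih _ (by rw [hfst']; exact hnd) (by
      intro v hv; rw [hfst']; exact hmem v (List.mem_cons_of_mem _ hv))]
    rw [List.map_map]
    refine List.map_congr_left (fun q hq => ?_)
    by_cases hqe : q.1 = u.1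
    · have hpq : q = p := List.inj_on_of_nodup_map hnd hq hp (by rw [hqe, hfst])
      simp [Function.comp, hpq, pvSum_cons, hfst]
      ring
    · simp [Function.comp, hqe, pvSum_cons, show ¬ (u.1 = q.1) from fun h => hqe h.symm]

theorem pvClampLoop (l : List (String × Int)) :
    ∀ (pre : List (String × Int)), ((pre ++ l).map Prod.fst).Nodup →
    ((l.map Prod.fst).foldl (fun d k => d.insert k (max 0 (min 100 (d.getD k 0)))) (PySem.Dict.mk (pre ++ l))).items
      = pre ++ l.map (fun kv => (kv.1, max 0 (min 100 kv.2))) := by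
  induction l with
  | nil => intro pre h; simp
  | cons kv rest ih =>
    intro pre hnd
    have hnd2 := hnd
    rw [List.map_append, List.nodup_append] at hnd2
    obtain ⟨-, hnd3, hdisj⟩ := hnd2
    have hpre : ∀ q ∈ pre, q.1 ≠ kv.1 := by
      intro q hq he
      exact hdisj q.1 (List.mem_map_of_mem hq : q.1 ∈ pre.map Prod.fst) kv.1 (by simp) he
    have hrest : ∀ q ∈ rest, q.1 ≠ kv.1 := by
      rw [List.map_cons, List.nodup_cons] at hnd3
      intro q hq he
      exact hnd3.1 (he ▸ (List.mem_map_of_mem hq : q.1 ∈ rest.map Prod.fst))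
    have hcont : (PySem.Dict.mk (pre ++ kv :: rest)).contains kv.1 = true := by
      rw [PySem.Dict.contains_iff_mem_keys]
      show kv.1 ∈ (pre ++ kv :: rest).map Prod.fst
      simp
    have hget : (PySem.Dict.mk (pre ++ kv :: rest)).getD kv.1 0 = kv.2 := by
      refine PySem.Dict.getD_of_mem_items _ ?_ hnd 0
      show (kv.1, kv.2) ∈ pre ++ kv :: rest
      simp
    have hins : (PySem.Dict.mk (pre ++ kv :: rest)).insert kv.1
          (max 0 (min 100 ((PySem.Dict.mk (pre ++ kv :: rest)).getD kv.1 0)))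
        = PySem.Dict.mk (pre ++ (kv.1, max 0 (min 100 kv.2)) :: rest) := by
      apply PySem.Dict.ext
      rw [PySem.Dict.items_insert_of_contains _ _ hcont, hget]
      show (pre ++ kv :: rest).map _ = _
      rw [List.map_append]
      congr 1
      · calc pre.map (fun q => if q.1 == kv.1 then (kv.1, max 0 (min 100 kv.2)) else q)
              = pre.map id := List.map_congr_left (fun q hq => by simp [hpre q hq])
          _ = pre := List.map_id pre
      · rw [List.map_cons]
        congr 1
        · simp
        calc rest.map (fun q => if q.1 == kv.1 then (kv.1, max 0 (min 100 kv.2)) else q)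
              = rest.map id := List.map_congr_left (fun q hq => by simp [hrest q hq])
          _ = rest := List.map_id rest
    rw [List.map_cons, List.foldl_cons, hins,
        show pre ++ (kv.1, max 0 (min 100 kv.2)) :: rest
            = (pre ++ [(kv.1, max 0 (min 100 kv.2))]) ++ rest by simp]
    rw [ih (pre ++ [(kv.1, max 0 (min 100 kv.2))]) (by
      have h5 : ((pre ++ [(kv.1, max 0 (min 100 kv.2))]) ++ rest).map Prod.fst
          = (pre ++ kv :: rest).map Prod.fst := by simp
      rw [h5]; exact hnd)]
    simp

theorem pvAirBlock_eq (g : PySem.Dict String (List Int)) (d : PySem.Dict String Int) :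
    pvAirBlock g d = pvApply d (pvChoose g ("air_temperature",
      [((fun v => v > 35), [("vegetation", -10), ("water", -5), ("energy", 5)]),
       ((fun v => v < 15), [("vegetation", -5), ("water", 5), ("energy", -5)]),
       ((fun _ => true),   [("vegetation", 5), ("water", 2), ("energy", 2)])])) := by
  unfold pvAirBlock pvChoose
  by_cases hc : g.items ≠ [] ∧ g.contains "air_temperature" = true ∧ g.getD "air_temperature" [] ≠ []
  · rw [if_pos hc, if_pos hc]
    by_cases h1 : PySem.List.pyGetD (g.getD "air_temperature" []) (-1) 0 > 35
    · simp [List.find?, h1, pvApply, sub_eq_add_neg]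
    · by_cases h2 : PySem.List.pyGetD (g.getD "air_temperature" []) (-1) 0 < 15
      · simp [List.find?, h1, h2, pvApply, sub_eq_add_neg]
      · simp [List.find?, h1, h2, pvApply]
  · rw [if_neg hc, if_neg hc]; simp [pvApply]

theorem pvPrecipBlock_eq (g : PySem.Dict String (List Int)) (d : PySem.Dict String Int) :
    pvPrecipBlock g d = pvApply d (pvChoose g ("precipitation",
      [((fun v => v > 100), [("water", 20), ("sustainability", 5)]),
       ((fun v => v < 20),  [("water", -10), ("sustainability", -5)]),
       ((fun _ => true),    [("water", 5)])])) := by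
  unfold pvPrecipBlock pvChoose
  by_cases hc : g.items ≠ [] ∧ g.contains "precipitation" = true ∧ g.getD "precipitation" [] ≠ []
  · rw [if_pos hc, if_pos hc]
    by_cases h1 : PySem.List.pyGetD (g.getD "precipitation" []) (-1) 0 > 100
    · simp [List.find?, h1, pvApply]
    · by_cases h2 : PySem.List.pyGetD (g.getD "precipitation" []) (-1) 0 < 20
      · simp [List.find?, h1, h2, pvApply, sub_eq_add_neg]
      · simp [List.find?, h1, h2, pvApply]
  · rw [if_neg hc, if_neg hc]; simp [pvApply]

theorem pvCloudBlock_eq (g : PySem.Dict String (List Int)) (d : PySem.Dict String Int) :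
    pvCloudBlock g d = pvApply d (pvChoose g ("cloud_coverage",
      [((fun v => v > 80), [("energy", -10), ("sustainability", -5)]),
       ((fun v => v < 20), [("energy", 10), ("sustainability", 5)]),
       ((fun _ => true),   [("energy", 2)])])) := by
  unfold pvCloudBlock pvChoose
  by_cases hc : g.items ≠ [] ∧ g.contains "cloud_coverage" = true ∧ g.getD "cloud_coverage" [] ≠ []
  · rw [if_pos hc, if_pos hc]
    by_cases h1 : PySem.List.pyGetD (g.getD "cloud_coverage" []) (-1) 0 > 80
    · simp [List.find?, h1, pvApply, sub_eq_add_neg]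
    · by_cases h2 : PySem.List.pyGetD (g.getD "cloud_coverage" []) (-1) 0 < 20
      · simp [List.find?, h1, h2, pvApply]
      · simp [List.find?, h1, h2, pvApply]
  · rw [if_neg hc, if_neg hc]; simp [pvApply]

theorem pvUs_mem (ecosystem : List (String × Int)) (globe_data : List (String × List Int))
    (h : pvKeysOK ecosystem globe_data) :
    ∀ u ∈ pvUs (PySem.Dict.mk globe_data), u.1 ∈ ecosystem.map Prod.fst := by
  obtain ⟨hA, hP, hC⟩ := h
  intro u hu
  unfold pvUs at hu
  rw [List.mem_append, List.mem_append] at hu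
  rcases hu with (h1 | h2) | h3
  · unfold pvChoose at h1
    split_ifs at h1 with hc
    swap
    · simp at h1
    obtain ⟨hv, hw, he⟩ := hA ⟨hc.2.1, hc.2.2⟩
    by_cases hgt : PySem.List.pyGetD ((PySem.Dict.mk globe_data).getD "air_temperature" []) (-1) 0 > 35
    · simp [List.find?, hgt] at h1
      rcases h1 with rfl | rfl | rfl <;> first | exact hv | exact hw | exact he
    · by_cases hlt : PySem.List.pyGetD ((PySem.Dict.mk globe_data).getD "air_temperature" []) (-1) 0 < 15
      · simp [List.find?, hgt, hlt] at h1
        rcases h1 with rfl | rfl | rfl <;> first | exact hv | exact hw | exact he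
      · simp [List.find?, hgt, hlt] at h1
        rcases h1 with rfl | rfl | rfl <;> first | exact hv | exact hw | exact he
  · unfold pvChoose at h2
    split_ifs at h2 with hc
    swap
    · simp at h2
    obtain ⟨hw, hs⟩ := hP ⟨hc.2.1, hc.2.2⟩
    by_cases hgt : PySem.List.pyGetD ((PySem.Dict.mk globe_data).getD "precipitation" []) (-1) 0 > 100
    · simp [List.find?, hgt] at h2
      rcases h2 with rfl | rfl
      · exact hw
      · exact hs (Or.inl hgt)
    · by_cases hlt : PySem.List.pyGetD ((PySem.Dict.mk globe_data).getD "precipitation" []) (-1) 0 < 20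
      · simp [List.find?, hgt, hlt] at h2
        rcases h2 with rfl | rfl
        · exact hw
        · exact hs (Or.inr hlt)
      · simp [List.find?, hgt, hlt] at h2
        rcases h2 with rfl
        exact hw
  · unfold pvChoose at h3
    split_ifs at h3 with hc
    swap
    · simp at h3
    obtain ⟨he, hs⟩ := hC ⟨hc.2.1, hc.2.2⟩
    by_cases hgt : PySem.List.pyGetD ((PySem.Dict.mk globe_data).getD "cloud_coverage" []) (-1) 0 > 80
    · simp [List.find?, hgt] at h3
      rcases h3 with rfl | rfl
      · exact he
      · exact hs (Or.inl hgt)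
    · by_cases hlt : PySem.List.pyGetD ((PySem.Dict.mk globe_data).getD "cloud_coverage" []) (-1) 0 < 20
      · simp [List.find?, hgt, hlt] at h3
        rcases h3 with rfl | rfl
        · exact he
        · exact hs (Or.inr hlt)
      · simp [List.find?, hgt, hlt] at h3
        rcases h3 with rfl
        exact he

theorem A_char (ecosystem : List (String × Int)) (globe_data : List (String × List Int))
    (hp : Pre_simulate_solarpunk_ecosystem ecosystem globe_data) :
    simulate_solarpunk_ecosystem ecosystem globe_data
      = ecosystem.map (fun kv => (kv.1, max 0 (min 100 (kv.2 + pvSum (pvUs (PySem.Dict.mk globe_data)) kv.1)))) := by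
  obtain ⟨hnd, -, hkeys⟩ := hp
  have hP : pvCloudBlock (PySem.Dict.mk globe_data)
        (pvPrecipBlock (PySem.Dict.mk globe_data)
          (pvAirBlock (PySem.Dict.mk globe_data) (PySem.Dict.mk ecosystem)))
      = pvApply (PySem.Dict.mk ecosystem) (pvUs (PySem.Dict.mk globe_data)) := by
    rw [pvAirBlock_eq, pvPrecipBlock_eq, pvCloudBlock_eq]
    unfold pvUs
    rw [pvApply_append, pvApply_append]
  show ((pvCloudBlock (PySem.Dict.mk globe_data)
        (pvPrecipBlock (PySem.Dict.mk globe_data)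
          (pvAirBlock (PySem.Dict.mk globe_data) (PySem.Dict.mk ecosystem)))).keys.foldl
      (fun d k => d.insert k (max 0 (min 100 (d.getD k 0))))
      (pvCloudBlock (PySem.Dict.mk globe_data)
        (pvPrecipBlock (PySem.Dict.mk globe_data)
          (pvAirBlock (PySem.Dict.mk globe_data) (PySem.Dict.mk ecosystem))))).items = _
  rw [hP]
  have hPmk : pvApply (PySem.Dict.mk ecosystem) (pvUs (PySem.Dict.mk globe_data))
      = PySem.Dict.mk (ecosystem.map (fun kv => (kv.1, kv.2 + pvSum (pvUs (PySem.Dict.mk globe_data)) kv.1))) := by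
    apply PySem.Dict.ext
    exact items_pvApply (pvUs (PySem.Dict.mk globe_data)) ecosystem hnd (pvUs_mem _ _ hkeys)
  rw [hPmk]
  have hfst : (ecosystem.map (fun kv => (kv.1, kv.2 + pvSum (pvUs (PySem.Dict.mk globe_data)) kv.1))).map Prod.fst
      = ecosystem.map Prod.fst := by
    rw [List.map_map]; exact List.map_congr_left (fun q _ => rfl)
  have hcl := pvClampLoop
      (ecosystem.map (fun kv => (kv.1, kv.2 + pvSum (pvUs (PySem.Dict.mk globe_data)) kv.1))) []
      (by rw [List.nil_append, hfst]; exact hnd)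
  rw [List.nil_append] at hcl
  rw [show (PySem.Dict.mk (ecosystem.map (fun kv => (kv.1, kv.2 + pvSum (pvUs (PySem.Dict.mk globe_data)) kv.1)))).keys
      = (ecosystem.map (fun kv => (kv.1, kv.2 + pvSum (pvUs (PySem.Dict.mk globe_data)) kv.1))).map Prod.fst from rfl]
  rw [hcl, List.nil_append, List.map_map]
  exact List.map_congr_left (fun q _ => rfl)

-- the pvSum of each A tier table equals the corresponding addend of Source B's delta(key)
theorem pvFilterNone (k : String) (l : List (String × Int)) (h : ∀ u ∈ l, u.1 ≠ k) :
    ((l.filter (fun u => u.1 == k)).map Prod.snd).sum = 0 := by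
  rw [List.filter_eq_nil_iff.mpr (by intro u hu; simpa using h u hu)]
  simp

theorem pvAirSum (g : PySem.Dict String (List Int)) (k : String) :
    pvSum (pvChoose g ("air_temperature",
      [((fun v => v > 35), [("vegetation", -10), ("water", -5), ("energy", 5)]),
       ((fun v => v < 15), [("vegetation", -5), ("water", 5), ("energy", -5)]),
       ((fun _ => true),   [("vegetation", 5), ("water", 2), ("energy", 2)])])) k
    = (match pvLatestB g "air_temperature" with
       | some v =>
         if k == "vegetation" then (if v > 35 then -10 else if v < 15 then -5 else 5)
         else if k == "water" then (if v > 35 then -5 else if v < 15 then 5 else 2)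
         else if k == "energy" then (if v > 35 then 5 else if v < 15 then -5 else 2)
         else 0
       | none => 0) := by
  unfold pvChoose pvLatestB
  by_cases hc : g.items ≠ [] ∧ g.contains "air_temperature" = true ∧ g.getD "air_temperature" [] ≠ []
  · rw [if_pos hc, if_pos hc]
    by_cases h1 : PySem.List.pyGetD (g.getD "air_temperature" []) (-1) 0 > 35
    · simp [List.find?, h1, pvSum]
      split_ifs with a b c
      · simp_all
      · simp_all
      · simp_all
      · refine pvFilterNone _ _ ?_
        intro u hu
        simp only [List.mem_cons, List.not_mem_nil, or_false] at hu
        rcases hu with rfl | rfl | rfl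
        exacts [fun h => a h.symm, fun h => b h.symm, fun h => c h.symm]
    · by_cases h2 : PySem.List.pyGetD (g.getD "air_temperature" []) (-1) 0 < 15
      · simp [List.find?, h1, h2, pvSum]
        split_ifs with a b c
        · simp_all
        · simp_all
        · simp_all
        · refine pvFilterNone _ _ ?_
          intro u hu
          simp only [List.mem_cons, List.not_mem_nil, or_false] at hu
          rcases hu with rfl | rfl | rfl
          exacts [fun h => a h.symm, fun h => b h.symm, fun h => c h.symm]
      · simp [List.find?, h1, h2, pvSum]
        split_ifs with a b c
        · simp_all
        · simp_all
        · simp_all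
        · refine pvFilterNone _ _ ?_
          intro u hu
          simp only [List.mem_cons, List.not_mem_nil, or_false] at hu
          rcases hu with rfl | rfl | rfl
          exacts [fun h => a h.symm, fun h => b h.symm, fun h => c h.symm]
  · rw [if_neg hc, if_neg hc]; simp [pvSum]

theorem pvPrecipSum (g : PySem.Dict String (List Int)) (k : String) :
    pvSum (pvChoose g ("precipitation",
      [((fun v => v > 100), [("water", 20), ("sustainability", 5)]),
       ((fun v => v < 20),  [("water", -10), ("sustainability", -5)]),
       ((fun _ => true),    [("water", 5)])])) k
    = (match pvLatestB g "precipitation" with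
       | some v =>
         if k == "water" then (if v > 100 then 20 else if v < 20 then -10 else 5)
         else if k == "sustainability" then (if v > 100 then 5 else if v < 20 then -5 else 0)
         else 0
       | none => 0) := by
  unfold pvChoose pvLatestB
  by_cases hc : g.items ≠ [] ∧ g.contains "precipitation" = true ∧ g.getD "precipitation" [] ≠ []
  · rw [if_pos hc, if_pos hc]
    by_cases h1 : PySem.List.pyGetD (g.getD "precipitation" []) (-1) 0 > 100
    · simp [List.find?, h1, pvSum]
      split_ifs with a b
      · simp_all
      · simp_all
      · refine pvFilterNone _ _ ?_
        intro u hu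
        simp only [List.mem_cons, List.not_mem_nil, or_false] at hu
        rcases hu with rfl | rfl
        exacts [fun h => a h.symm, fun h => b h.symm]
    · by_cases h2 : PySem.List.pyGetD (g.getD "precipitation" []) (-1) 0 < 20
      · simp [List.find?, h1, h2, pvSum]
        split_ifs with a b
        · simp_all
        · simp_all
        · refine pvFilterNone _ _ ?_
          intro u hu
          simp only [List.mem_cons, List.not_mem_nil, or_false] at hu
          rcases hu with rfl | rfl
          exacts [fun h => a h.symm, fun h => b h.symm]
      · simp [List.find?, h1, h2, pvSum]
        split_ifs with a
        · simp_all
        · refine pvFilterNone _ _ ?_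
          intro u hu
          simp only [List.mem_cons, List.not_mem_nil, or_false] at hu
          rcases hu with rfl
          exacts [fun h => a h.symm]
  · rw [if_neg hc, if_neg hc]; simp [pvSum]

theorem pvCloudSum (g : PySem.Dict String (List Int)) (k : String) :
    pvSum (pvChoose g ("cloud_coverage",
      [((fun v => v > 80), [("energy", -10), ("sustainability", -5)]),
       ((fun v => v < 20), [("energy", 10), ("sustainability", 5)]),
       ((fun _ => true),   [("energy", 2)])])) k
    = (match pvLatestB g "cloud_coverage" with
       | some v =>
         if k == "energy" then (if v > 80 then -10 else if v < 20 then 10 else 2)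
         else if k == "sustainability" then (if v > 80 then -5 else if v < 20 then 5 else 0)
         else 0
       | none => 0) := by
  unfold pvChoose pvLatestB
  by_cases hc : g.items ≠ [] ∧ g.contains "cloud_coverage" = true ∧ g.getD "cloud_coverage" [] ≠ []
  · rw [if_pos hc, if_pos hc]
    by_cases h1 : PySem.List.pyGetD (g.getD "cloud_coverage" []) (-1) 0 > 80
    · simp [List.find?, h1, pvSum]
      split_ifs with a b
      · simp_all
      · simp_all
      · refine pvFilterNone _ _ ?_
        intro u hu
        simp only [List.mem_cons, List.not_mem_nil, or_false] at hu
        rcases hu with rfl | rfl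
        exacts [fun h => a h.symm, fun h => b h.symm]
    · by_cases h2 : PySem.List.pyGetD (g.getD "cloud_coverage" []) (-1) 0 < 20
      · simp [List.find?, h1, h2, pvSum]
        split_ifs with a b
        · simp_all
        · simp_all
        · refine pvFilterNone _ _ ?_
          intro u hu
          simp only [List.mem_cons, List.not_mem_nil, or_false] at hu
          rcases hu with rfl | rfl
          exacts [fun h => a h.symm, fun h => b h.symm]
      · simp [List.find?, h1, h2, pvSum]
        split_ifs with a
        · simp_all
        · refine pvFilterNone _ _ ?_
          intro u hu
          simp only [List.mem_cons, List.not_mem_nil, or_false] at hu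
          rcases hu with rfl
          exacts [fun h => a h.symm]
  · rw [if_neg hc, if_neg hc]; simp [pvSum]

theorem pvDelta_eq (g : PySem.Dict String (List Int)) (k : String) :
    pvDelta (pvLatestB g "air_temperature") (pvLatestB g "precipitation") (pvLatestB g "cloud_coverage") k
      = pvSum (pvUs g) k := by
  unfold pvUs pvDelta
  rw [pvSum_append, pvSum_append, pvAirSum, pvPrecipSum, pvCloudSum]

theorem B_char (ecosystem : List (String × Int)) (globe_data : List (String × List Int))
    (hnd : (ecosystem.map Prod.fst).Nodup) :
    simulate_solarpunk_ecosystem_alt ecosystem globe_data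
      = ecosystem.map (fun kv => (kv.1, max 0 (min 100 (kv.2 + pvSum (pvUs (PySem.Dict.mk globe_data)) kv.1)))) := by
  show (ecosystem.foldl (fun (d : PySem.Dict String Int) kv =>
      d.insert kv.1 (max 0 (min 100 (kv.2 + pvDelta
        (pvLatestB (PySem.Dict.mk globe_data) "air_temperature")
        (pvLatestB (PySem.Dict.mk globe_data) "precipitation")
        (pvLatestB (PySem.Dict.mk globe_data) "cloud_coverage") kv.1)))) PySem.Dict.empty).items = _
  rw [PySem.Dict.items_foldl_insert_fresh ecosystem (fun kv => kv.1)
      (fun kv => max 0 (min 100 (kv.2 + pvDelta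
        (pvLatestB (PySem.Dict.mk globe_data) "air_temperature")
        (pvLatestB (PySem.Dict.mk globe_data) "precipitation")
        (pvLatestB (PySem.Dict.mk globe_data) "cloud_coverage") kv.1)))
      PySem.Dict.empty (fun a _ => PySem.Dict.contains_empty a.1) hnd]
  rw [show (PySem.Dict.empty : PySem.Dict String Int).items = [] from rfl, List.nil_append]
  exact List.map_congr_left (fun q _ => by rw [pvDelta_eq])

-- ===== VERDICT (by name: the statement is the Claim_ definition above) =====
theorem simulate_solarpunk_ecosystem_spec : Claim_equal_simulate_solarpunk_ecosystem := by
  intro ecosystem globe_data _ hp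
  unfold Spec_simulate_solarpunk_ecosystem
  rw [A_char ecosystem globe_data hp, B_char ecosystem globe_data hp.1]
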